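-- pv_equiv track=rewrite | github.com/zhpn1024/ribotish | src/zbio/stat.py | orderIter
-- ===== SOURCE A (Python) =====
-- def orderIter(arr, reverse = False):
--   '''generate order of given array. e.g. the index of smallest item come first
--   '''
--   ad = {}
--   for i, v in enumerate(arr):
--     if v not in ad : ad[v] = []
--     ad[v].append(i)
--   a = sorted(ad, reverse = reverse)
--   for v in a :
--     for i in ad[v] : yield i
-- ===== SOURCE B (Python) =====
-- def orderIter(arr, reverse = False):
--   '''generate order of given array. e.g. the index of smallest item come first
--   '''
--   for i in sorted(range(len(arr)), key=lambda i: arr[i], reverse=reverse):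
--     yield i
-- ===== Notes on version B (the rewrite author's own statement) =====
-- stated objective: idiomatic
-- what changed: Replaced the group-by-value dict plus sorted-keys double loop with a single stable keyed sort of the index range (sorted(range(len(arr)), key=lambda i: arr[i], reverse=reverse)), relying on sort stability for within-tie original order.
import Mathlib
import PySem

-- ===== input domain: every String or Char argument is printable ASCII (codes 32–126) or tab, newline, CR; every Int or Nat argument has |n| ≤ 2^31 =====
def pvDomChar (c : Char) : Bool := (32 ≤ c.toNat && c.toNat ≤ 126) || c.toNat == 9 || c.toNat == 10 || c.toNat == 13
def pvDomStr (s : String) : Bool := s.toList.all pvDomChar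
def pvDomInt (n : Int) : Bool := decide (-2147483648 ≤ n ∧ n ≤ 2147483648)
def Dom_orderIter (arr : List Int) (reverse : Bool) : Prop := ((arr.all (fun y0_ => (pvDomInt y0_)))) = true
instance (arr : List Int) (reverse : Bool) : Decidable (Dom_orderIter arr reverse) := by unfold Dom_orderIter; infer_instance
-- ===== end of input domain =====

-- B replaces A's group-by-value dict + sorted-keys double loop with one stable keyed sort of the
-- index range (idiomatic; generator return value compared as the list of yielded indices).

-- ===== PORT A =====
-- ad = {}; for i, v in enumerate(arr): if v not in ad: ad[v] = []; ad[v].append(i)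
-- a = sorted(ad, reverse=reverse); for v in a: for i in ad[v]: yield i
def orderIter (arr : List Int) (reverse : Bool) : List Int :=
  let ad := (PySem.List.enumerate arr 0).foldl
    (fun d p =>
      let d' := if d.contains p.2 then d else d.insert p.2 ([] : List Int)
      d'.modify p.2 [] (fun l => l ++ [p.1]))  -- ad[v].append(i); key present here, default unused
    PySem.Dict.empty
  let a := PySem.List.sorted ad.keys (fun v => v) reverse
  a.foldl (fun out v => out ++ ad.getD v []) []  -- ad[v] with v always a key of ad, so getD is exact

-- ===== PORT B =====
-- for i in sorted(range(len(arr)), key=lambda i: arr[i], reverse=reverse): yield i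
def orderIter_alt (arr : List Int) (reverse : Bool) : List Int :=
  PySem.List.sorted (PySem.List.pyRange 0 (PySem.List.len arr) 1)
    (fun i => PySem.List.pyGetD arr i 0) reverse

-- ===== PRECONDITION & SPEC =====
def Spec_orderIter (arr : List Int) (reverse : Bool) (out : List Int) : Prop := out = orderIter_alt arr reverse
instance (arr : List Int) (reverse : Bool) (out : List Int) : Decidable (Spec_orderIter arr reverse out) := by unfold Spec_orderIter; infer_instance

-- ===== CLAIM (what is proved, stated in full; the proofs are below) =====
def Claim_equal_orderIter : Prop := ∀ (arr : List Int) (reverse : Bool), Dom_orderIter arr reverse → Spec_orderIter arr reverse (orderIter arr reverse)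

-- ===== LEMMAS AND PROOFS =====

-- A's "if v not in ad: ad[v] = []" followed by append is the one-step modify.
lemma step_eq (d : PySem.Dict Int (List Int)) (p : Int × Int) :
    (let d' := if d.contains p.2 then d else d.insert p.2 ([] : List Int)
     d'.modify p.2 [] (fun l => l ++ [p.1])) = d.modify p.2 [] (fun l => l ++ [p.1]) := by
  by_cases h : d.contains p.2
  · simp [h]
  · have h' : d.contains p.2 = false := by simpa using h
    have hmod : ∀ (e : PySem.Dict Int (List Int)) (k : Int) (f : List Int → List Int),
        e.modify k [] f = e.insert k (f (e.getD k [])) := fun _ _ _ => rfl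
    simp only [h', Bool.false_eq_true, if_false, hmod]
    rw [PySem.Dict.getD_insert_self, PySem.Dict.insert_insert_self,
        PySem.Dict.getD_of_not_contains d [] h']

-- inserting x into an already key-sorted list: the key-x group gains x at its end, others unchanged
lemma filter_insertBy_le (key : Int → Int) (x v : Int) :
    ∀ (ys : List Int), ys.Pairwise (fun a b => key a ≤ key b) →
    (PySem.List.insertBy (fun a b => decide (key a < key b)) x ys).filter (fun y => key y == v)
      = if key x == v then ys.filter (fun y => key y == v) ++ [x]
        else ys.filter (fun y => key y == v) := by
  intro ys
  induction ys with
  | nil =>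
    intro _
    show List.filter (fun y => key y == v) [x] = _
    by_cases h : key x = v <;> simp [beq_iff_eq, h]
  | cons y t ih =>
    intro hp
    have hstep : PySem.List.insertBy (fun a b => decide (key a < key b)) x (y :: t)
        = if decide (key x < key y) then x :: y :: t
          else y :: PySem.List.insertBy (fun a b => decide (key a < key b)) x t := rfl
    rw [hstep]
    by_cases hlt : key x < key y
    · rw [if_pos (by simpa using hlt)]
      by_cases hv : key x = v
      · subst hv
        have hnil : (y :: t).filter (fun y => key y == key x) = [] := by
          apply List.filter_eq_nil_iff.mpr
          intro z hz
          have : key x < key z := by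
            rcases hz with _ | hz
            · exact hlt
            · exact lt_of_lt_of_le hlt ((List.pairwise_cons.mp hp).1 _ (by assumption))
          simp [beq_iff_eq]; omega
        simp [hnil]
      · simp [beq_iff_eq, hv]
    · rw [if_neg (by simpa using hlt)]
      have ht := (List.pairwise_cons.mp hp).2
      rw [List.filter_cons, List.filter_cons, ih ht]
      split_ifs <;> simp_all

lemma filter_insertBy_ge (key : Int → Int) (x v : Int) :
    ∀ (ys : List Int), ys.Pairwise (fun a b => key b ≤ key a) →
    (PySem.List.insertBy (fun a b => decide (key b < key a)) x ys).filter (fun y => key y == v)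
      = if key x == v then ys.filter (fun y => key y == v) ++ [x]
        else ys.filter (fun y => key y == v) := by
  intro ys
  induction ys with
  | nil =>
    intro _
    show List.filter (fun y => key y == v) [x] = _
    by_cases h : key x = v <;> simp [beq_iff_eq, h]
  | cons y t ih =>
    intro hp
    have hstep : PySem.List.insertBy (fun a b => decide (key b < key a)) x (y :: t)
        = if decide (key y < key x) then x :: y :: t
          else y :: PySem.List.insertBy (fun a b => decide (key b < key a)) x t := rfl
    rw [hstep]
    by_cases hlt : key y < key x
    · rw [if_pos (by simpa using hlt)]
      by_cases hv : key x = v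
      · subst hv
        have hnil : (y :: t).filter (fun y => key y == key x) = [] := by
          apply List.filter_eq_nil_iff.mpr
          intro z hz
          have : key z < key x := by
            rcases hz with _ | hz
            · exact hlt
            · exact lt_of_le_of_lt ((List.pairwise_cons.mp hp).1 _ (by assumption)) hlt
          simp [beq_iff_eq]; omega
        simp [hnil]
      · simp [beq_iff_eq, hv]
    · rw [if_neg (by simpa using hlt)]
      have ht := (List.pairwise_cons.mp hp).2
      rw [List.filter_cons, List.filter_cons, ih ht]
      split_ifs <;> simp_all

-- STABILITY of Python's sort, in filter form: each equal-key group keeps its original order.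
lemma filter_sorted (key : Int → Int) (rev : Bool) (v : Int) (l : List Int) :
    (PySem.List.sorted l key rev).filter (fun y => key y == v) = l.filter (fun y => key y == v) := by
  cases rev with
  | false =>
    induction l using List.reverseRecOn with
    | nil => rfl
    | append_singleton t x ih =>
      rw [PySem.List.sorted_eq_foldl_insertBy, List.foldl_append, List.foldl_cons, List.foldl_nil,
          ← PySem.List.sorted_eq_foldl_insertBy,
          filter_insertBy_le key x v _ (PySem.List.sorted_pairwise t key), ih,
          List.filter_append]
      split_ifs <;> simp_all
  | true =>
    induction l using List.reverseRecOn with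
    | nil => rfl
    | append_singleton t x ih =>
      rw [PySem.List.sorted_rev_eq_foldl_insertBy, List.foldl_append, List.foldl_cons, List.foldl_nil,
          ← PySem.List.sorted_rev_eq_foldl_insertBy,
          filter_insertBy_ge key x v _ (PySem.List.sorted_pairwise_rev t key), ih,
          List.filter_append]
      split_ifs <;> simp_all

-- a key-sorted list splits into its minimal-key prefix and the strictly larger rest
lemma split_min_le (key : Int → Int) (v : Int) :
    ∀ (l : List Int), l.Pairwise (fun a b => key a ≤ key b) → (∀ x ∈ l, v ≤ key x) →
    ∃ t d, l = t ++ d ∧ (∀ x ∈ t, key x = v) ∧ (∀ x ∈ d, v < key x) := by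
  intro l
  induction l with
  | nil => exact fun _ _ => ⟨[], [], by simp⟩
  | cons x l ih =>
    intro hp hb
    by_cases hv : key x = v
    · obtain ⟨t, d, h1, h2, h3⟩ := ih (List.pairwise_cons.mp hp).2 (fun y hy => hb y (by simp [hy]))
      refine ⟨x :: t, d, by simp [h1], ?_, h3⟩
      intro z hz
      rcases List.mem_cons.mp hz with rfl | hz'
      · exact hv
      · exact h2 z hz'
    · refine ⟨[], x :: l, by simp, by simp, ?_⟩
      have hxv : v < key x := lt_of_le_of_ne (hb x (by simp)) (Ne.symm hv)
      intro z hz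
      rcases List.mem_cons.mp hz with rfl | hz'
      · exact hxv
      · exact lt_of_lt_of_le hxv ((List.pairwise_cons.mp hp).1 z hz')

lemma split_max_ge (key : Int → Int) (v : Int) :
    ∀ (l : List Int), l.Pairwise (fun a b => key b ≤ key a) → (∀ x ∈ l, key x ≤ v) →
    ∃ t d, l = t ++ d ∧ (∀ x ∈ t, key x = v) ∧ (∀ x ∈ d, key x < v) := by
  intro l
  induction l with
  | nil => exact fun _ _ => ⟨[], [], by simp⟩
  | cons x l ih =>
    intro hp hb
    by_cases hv : key x = v
    · obtain ⟨t, d, h1, h2, h3⟩ := ih (List.pairwise_cons.mp hp).2 (fun y hy => hb y (by simp [hy]))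
      refine ⟨x :: t, d, by simp [h1], ?_, h3⟩
      intro z hz
      rcases List.mem_cons.mp hz with rfl | hz'
      · exact hv
      · exact h2 z hz'
    · refine ⟨[], x :: l, by simp, by simp, ?_⟩
      have hxv : key x < v := lt_of_le_of_ne (hb x (by simp)) hv
      intro z hz
      rcases List.mem_cons.mp hz with rfl | hz'
      · exact hxv
      · exact lt_of_le_of_lt ((List.pairwise_cons.mp hp).1 z hz') hxv

-- a key-sorted list is the concatenation of its groups, taken along its sorted distinct keys
lemma groups_concat_le (key : Int → Int) :
    ∀ (ks l : List Int), ks.Pairwise (· < ·) →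
      l.Pairwise (fun a b => key a ≤ key b) →
      (∀ x ∈ l, key x ∈ ks) → (∀ w ∈ ks, w ∈ l.map key) →
      ks.flatMap (fun w => l.filter (fun x => key x == w)) = l := by
  intro ks
  induction ks with
  | nil =>
    intro l _ _ hx _
    cases l with
    | nil => rfl
    | cons a l => exact absurd (hx a (by simp)) (by simp)
  | cons v ks ih =>
    intro l hks hl hx hw
    have hb : ∀ x ∈ l, v ≤ key x := by
      intro x hxl
      rcases List.mem_cons.mp (hx x hxl) with h | h
      · omega
      · exact le_of_lt ((List.pairwise_cons.mp hks).1 _ h)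
    obtain ⟨t, d, rfl, ht, hd⟩ := split_min_le key v l hl hb
    have htf : t.filter (fun x => key x == v) = t :=
      List.filter_eq_self.mpr (fun z hz => by simp [ht z hz])
    have hdf : d.filter (fun x => key x == v) = [] :=
      List.filter_eq_nil_iff.mpr (fun z hz => by have := hd z hz; simp [beq_iff_eq]; omega)
    have hgrp : ∀ w ∈ ks, (t ++ d).filter (fun x => key x == w) = d.filter (fun x => key x == w) := by
      intro w hwk
      have hvw : v < w := (List.pairwise_cons.mp hks).1 _ hwk
      rw [List.filter_append, List.filter_eq_nil_iff.mpr
        (fun z hz => by have := ht z hz; simp [beq_iff_eq]; omega), List.nil_append]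
    rw [List.flatMap_cons, List.filter_append, htf, hdf, List.append_nil]
    have hrest : ks.flatMap (fun w => (t ++ d).filter (fun x => key x == w))
        = ks.flatMap (fun w => d.filter (fun x => key x == w)) := by
      rw [List.flatMap_def, List.flatMap_def, List.map_congr_left hgrp]
    rw [hrest, ih d (List.pairwise_cons.mp hks).2 ((List.pairwise_append.mp hl).2.1)
      (fun x hxd => by
        rcases List.mem_cons.mp (hx x (by simp [hxd])) with h | h
        · exact absurd h (by have := hd x hxd; omega)
        · exact h)
      (fun w hwk => by
        have hvw : v < w := (List.pairwise_cons.mp hks).1 _ hwk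
        rcases List.mem_map.mp (hw w (by simp [hwk])) with ⟨z, hz, rfl⟩
        rcases List.mem_append.mp hz with h | h
        · exact absurd (ht z h) (by omega)
        · exact List.mem_map_of_mem h)]

lemma groups_concat_ge (key : Int → Int) :
    ∀ (ks l : List Int), ks.Pairwise (· > ·) →
      l.Pairwise (fun a b => key b ≤ key a) →
      (∀ x ∈ l, key x ∈ ks) → (∀ w ∈ ks, w ∈ l.map key) →
      ks.flatMap (fun w => l.filter (fun x => key x == w)) = l := by
  intro ks
  induction ks with
  | nil =>
    intro l _ _ hx _
    cases l with
    | nil => rfl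
    | cons a l => exact absurd (hx a (by simp)) (by simp)
  | cons v ks ih =>
    intro l hks hl hx hw
    have hb : ∀ x ∈ l, key x ≤ v := by
      intro x hxl
      rcases List.mem_cons.mp (hx x hxl) with h | h
      · omega
      · exact le_of_lt ((List.pairwise_cons.mp hks).1 _ h)
    obtain ⟨t, d, rfl, ht, hd⟩ := split_max_ge key v l hl hb
    have htf : t.filter (fun x => key x == v) = t :=
      List.filter_eq_self.mpr (fun z hz => by simp [ht z hz])
    have hdf : d.filter (fun x => key x == v) = [] :=
      List.filter_eq_nil_iff.mpr (fun z hz => by have := hd z hz; simp [beq_iff_eq]; omega)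
    have hgrp : ∀ w ∈ ks, (t ++ d).filter (fun x => key x == w) = d.filter (fun x => key x == w) := by
      intro w hwk
      have hvw : w < v := (List.pairwise_cons.mp hks).1 _ hwk
      rw [List.filter_append, List.filter_eq_nil_iff.mpr
        (fun z hz => by have := ht z hz; simp [beq_iff_eq]; omega), List.nil_append]
    rw [List.flatMap_cons, List.filter_append, htf, hdf, List.append_nil]
    have hrest : ks.flatMap (fun w => (t ++ d).filter (fun x => key x == w))
        = ks.flatMap (fun w => d.filter (fun x => key x == w)) := by
      rw [List.flatMap_def, List.flatMap_def, List.map_congr_left hgrp]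
    rw [hrest, ih d (List.pairwise_cons.mp hks).2 ((List.pairwise_append.mp hl).2.1)
      (fun x hxd => by
        rcases List.mem_cons.mp (hx x (by simp [hxd])) with h | h
        · exact absurd h (by have := hd x hxd; omega)
        · exact h)
      (fun w hwk => by
        have hvw : w < v := (List.pairwise_cons.mp hks).1 _ hwk
        rcases List.mem_map.mp (hw w (by simp [hwk])) with ⟨z, hz, rfl⟩
        rcases List.mem_append.mp hz with h | h
        · exact absurd (ht z h) (by omega)
        · exact List.mem_map_of_mem h)]

-- A's value, in closed form: sorted distinct values, each followed by its group of indices.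
lemma orderIter_eq (arr : List Int) (rev : Bool) :
    orderIter arr rev
      = (PySem.List.sorted (PySem.Set.ofList arr) (fun v => v) rev).flatMap
          (fun v => (PySem.List.pyRange 0 (PySem.List.len arr) 1).filter
            (fun i => PySem.List.pyGetD arr i 0 == v)) := by
  have hD : (PySem.List.enumerate arr 0).foldl
      (fun d p =>
        let d' := if d.contains p.2 then d else d.insert p.2 ([] : List Int)
        d'.modify p.2 [] (fun l => l ++ [p.1])) PySem.Dict.empty
      = (PySem.List.enumerate arr 0).foldl
        (fun d p => d.modify p.2 [] (fun l => l ++ [p.1])) PySem.Dict.empty :=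
    PySem.List.foldl_congr_mem _ _ _ _ (fun d p _ => step_eq d p)
  have hkeys : ((PySem.List.enumerate arr 0).foldl
      (fun d p => d.modify p.2 [] (fun l => l ++ [p.1])) PySem.Dict.empty).keys
      = PySem.Set.ofList arr := by
    rw [PySem.Dict.keys_foldl_modify_key (PySem.List.enumerate arr 0) Prod.snd []
      (fun _ p => fun l => l ++ [p.1]) PySem.Dict.empty]
    simp [PySem.Set.update_nil_left, PySem.List.map_snd_enumerate]
  have hget : ∀ v, ((PySem.List.enumerate arr 0).foldl
      (fun d p => d.modify p.2 [] (fun l => l ++ [p.1])) PySem.Dict.empty).getD v []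
      = (PySem.List.pyRange 0 (PySem.List.len arr) 1).filter
          (fun i => PySem.List.pyGetD arr i 0 == v) := by
    intro v
    rw [show ((PySem.List.enumerate arr 0).foldl
        (fun d p => d.modify p.2 [] (fun l => l ++ [p.1])) PySem.Dict.empty)
        = (((PySem.List.enumerate arr 0).map Prod.swap).foldl
            (fun d p => d.modify p.1 [] (fun l => l ++ [p.2])) PySem.Dict.empty) from
      by rw [List.foldl_map]; exact PySem.List.foldl_congr_mem _ _ _ _ (fun d p _ => rfl)]
    rw [PySem.Dict.getD_foldl_modify_append]
    rw [PySem.List.enumerate_eq_map_pyRange arr 0]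
    simp [List.map_map, List.filter_map, Function.comp_def, PySem.Dict.getD_empty]
  have hzeta : orderIter arr rev
      = (PySem.List.sorted (((PySem.List.enumerate arr 0).foldl
          (fun d p =>
            let d' := if d.contains p.2 then d else d.insert p.2 ([] : List Int)
            d'.modify p.2 [] (fun l => l ++ [p.1])) PySem.Dict.empty).keys) (fun v => v) rev).foldl
          (fun out v => out ++ ((PySem.List.enumerate arr 0).foldl
            (fun d p =>
              let d' := if d.contains p.2 then d else d.insert p.2 ([] : List Int)
              d'.modify p.2 [] (fun l => l ++ [p.1])) PySem.Dict.empty).getD v []) [] := rfl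
  rw [hzeta]
  simp only [hD, hkeys, hget]
  rw [PySem.List.foldl_append_eq_flatMap, List.nil_append]

-- ===== VERDICT (by name: the statement is the Claim_ definition above) =====
theorem orderIter_spec : Claim_equal_orderIter := by
  intro arr rev _
  unfold Spec_orderIter orderIter_alt
  rw [orderIter_eq]
  have hmapkey : (PySem.List.pyRange 0 (PySem.List.len arr) 1).map
      (fun i => PySem.List.pyGetD arr i 0) = arr := PySem.List.map_pyGetD_pyRange_zero arr 0
  have hx : ∀ x ∈ PySem.List.sorted (PySem.List.pyRange 0 (PySem.List.len arr) 1)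
      (fun i => PySem.List.pyGetD arr i 0) rev,
      PySem.List.pyGetD arr x 0 ∈ PySem.List.sorted (PySem.Set.ofList arr) (fun v => v) rev := by
    intro x hxs
    rw [PySem.List.mem_sorted] at hxs
    rw [PySem.List.mem_sorted, PySem.Set.mem_ofList]
    have h2 : PySem.List.pyGetD arr x 0
        ∈ (PySem.List.pyRange 0 (PySem.List.len arr) 1).map (fun i => PySem.List.pyGetD arr i 0) :=
      List.mem_map_of_mem (f := fun i => PySem.List.pyGetD arr i 0) hxs
    rw [hmapkey] at h2
    exact h2
  have hw : ∀ w ∈ PySem.List.sorted (PySem.Set.ofList arr) (fun v => v) rev,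
      w ∈ (PySem.List.sorted (PySem.List.pyRange 0 (PySem.List.len arr) 1)
        (fun i => PySem.List.pyGetD arr i 0) rev).map (fun i => PySem.List.pyGetD arr i 0) := by
    intro w hws
    rw [PySem.List.mem_sorted, PySem.Set.mem_ofList] at hws
    rw [((PySem.List.sorted_perm _ _ _).map _).mem_iff, hmapkey]
    exact hws
  have hstab : ∀ v, (PySem.List.pyRange 0 (PySem.List.len arr) 1).filter
        (fun i => PySem.List.pyGetD arr i 0 == v)
      = (PySem.List.sorted (PySem.List.pyRange 0 (PySem.List.len arr) 1)
          (fun i => PySem.List.pyGetD arr i 0) rev).filter (fun i => PySem.List.pyGetD arr i 0 == v) :=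
    fun v => (filter_sorted _ rev v _).symm
  have hbody : (PySem.List.sorted (PySem.Set.ofList arr) (fun v => v) rev).flatMap
        (fun v => (PySem.List.pyRange 0 (PySem.List.len arr) 1).filter
          (fun i => PySem.List.pyGetD arr i 0 == v))
      = (PySem.List.sorted (PySem.Set.ofList arr) (fun v => v) rev).flatMap
        (fun v => (PySem.List.sorted (PySem.List.pyRange 0 (PySem.List.len arr) 1)
          (fun i => PySem.List.pyGetD arr i 0) rev).filter
            (fun i => PySem.List.pyGetD arr i 0 == v)) := by
    rw [List.flatMap_def, List.flatMap_def]
    exact congrArg List.flatten (List.map_congr_left (fun v _ => hstab v))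
  rw [hbody]
  cases rev with
  | false =>
    exact groups_concat_le _ _ _ (PySem.List.sorted_ofList_pairwise_lt arr)
      (PySem.List.sorted_pairwise _ _) hx hw
  | true =>
    have hnd : (PySem.List.sorted (PySem.Set.ofList arr) (fun v => v) true).Nodup :=
      ((PySem.List.sorted_perm _ _ _).nodup_iff).mpr (PySem.Set.nodup_ofList arr)
    have hks : (PySem.List.sorted (PySem.Set.ofList arr) (fun v => v) true).Pairwise (· > ·) := by
      have h1 := PySem.List.sorted_pairwise_rev (PySem.Set.ofList arr) (fun v => v)
      have h2 : (PySem.List.sorted (PySem.Set.ofList arr) (fun v => v) true).Pairwise (· ≠ ·) := hnd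
      exact (h1.and h2).imp (fun h => lt_of_le_of_ne h.1 (Ne.symm h.2))
    exact groups_concat_ge _ _ _ hks (PySem.List.sorted_pairwise_rev _ _) hx hw
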